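-- pv_equiv track=rewrite | github.com/T-Strawbs/CSA1 | binary_calculator.py | is_less_than
-- ===== SOURCE A (Python) =====
-- def is_less_than(binary_x: list[int],binary_y: list[int]) -> bool:
--     '''
--     function for performing multi bit comparason to see if binary_x is < binary_y and returns a bool
--     '''
--     #get the max_len between both lists
--     max_len = max(len(binary_x),len(binary_y))
--     #initalise copies of the lists so we dont work with the references
--     x_list = list([0]*(max_len - len(binary_x)) + binary_x)
--     y_list = list([0]*(max_len - len(binary_y)) + binary_y)
--
--     #reverse both lists to compare from LSD to MSD
--     x_list.reverse()
--     y_list.reverse()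
--
--     l = 0
--     #iterate over each item in both lists
--     for i in range(0,max_len):
--         #get the items
--         x = x_list[i]
--         y = y_list[i]
--         #compare x and y to determine if x < y
--         l = LESS_THAN(x,y,l)
--     #return true if x < 1 or false if not
--     return l == 1
--
-- def NOR(x: int,y: int) -> int:
--     '''
--     NOR function to get the value of !x&&!y, the invers of an OR function.
--     '''
--     #if x and y are false, or in this case 0:
--     if x == 0 and y == 0:
--         #return true, or in this case 1
--         return 1
--     #NOR is only true when both x and y are false so return false; 0
--     else:
--         return 0
--
-- def NOT(x: int) -> int:
--     '''
--     Not Function that works by pushing x into NOR to get the inverse of x.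
--
--     E.g. --> x = 1;  xNORx === !x&&!x = !x = 0;
--     '''
--     return NOR(x,x)
--
-- def AND(x: int, y: int) -> int:
--     '''
--     And function that works by pushing x into a NOT and Y into an NOT then pushing those values
--     into a NOR the AND. We are effectively inverting the values of the NOR from !x&&!y into x&&y
--     converting the NOR into an AND.
--
--     E.g. --> x = 1, y = 1; !xNOR!y === !!x&&!!y === x&&y = 1;
--     '''
--     return NOR(NOT(x),NOT(y))
--
-- def OR(x: int, y:int) -> int:
--     '''
--     Or function that works by getting the NOR of the NORs of x and y. This effectively inverts the
--     NOR function into an OR.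
--
--     E.g:
--         • OR == True:
--             x = 1, y = 0; (xNORy)NOR(xNORy) === !(!x&&!y)&&!(!x&&y!);
--             (!x&&!y) = 0, !(!x&&!y) = 1, !(!x&&!y)&&!(!x&&!y) = 1;
--         • OR == False:
--             x = 0, y = 0; (xNORy)NOR(xNORy) === !(!x&&!y)&&!(!x&&y!);
--             (!x&&!y) = 1, !(!x&&!y) = 0, !(!x&&!y)&&!(!x&&!y) = 0;
--     '''
--     return NOR(NOR(x,y),NOR(x,y))
--
-- def XOR(x: int,y: int) -> int:
--     '''
--     XOR function that works by following the compound expression of !x&&y||x&&!y.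
--     '''
--     return OR(
--         AND(NOT(x),y),
--         AND(x,NOT(y))
--     )
--
-- def LESS_THAN(x: int, y: int, l: int) -> int:
--     '''
--     Single bit comparason function for comparing if x < y, considering the result of the lower digit from
--     a previous check; l.
--     '''
--     return OR(
--         AND(
--             NOT(x),
--             y
--         ),
--         AND(
--             NOT(XOR(x,y)),
--             l
--         )
--     )
-- ===== SOURCE B (Python) =====
-- def is_less_than(binary_x: list[int], binary_y: list[int]) -> bool:
--     '''MSB-first scan: at the first position where the (truthy) bits differ, x < y iff y's bit is set.'''
--     n = max(len(binary_x), len(binary_y))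
--     xs = [0] * (n - len(binary_x)) + binary_x
--     ys = [0] * (n - len(binary_y)) + binary_y
--     for x, y in zip(xs, ys):
--         if (x != 0) != (y != 0):
--             return y != 0
--     return False
-- ===== Notes on version B (the rewrite author's own statement) =====
-- stated objective: simpler
-- what changed: Replaces the LSB-to-MSB carry-flag propagation through NOR-built gate primitives (NOR/NOT/AND/OR/XOR/LESS_THAN) with a single MSB-first scan over the zero-padded lists that returns at the first position where the bits differ.
import Mathlib
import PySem

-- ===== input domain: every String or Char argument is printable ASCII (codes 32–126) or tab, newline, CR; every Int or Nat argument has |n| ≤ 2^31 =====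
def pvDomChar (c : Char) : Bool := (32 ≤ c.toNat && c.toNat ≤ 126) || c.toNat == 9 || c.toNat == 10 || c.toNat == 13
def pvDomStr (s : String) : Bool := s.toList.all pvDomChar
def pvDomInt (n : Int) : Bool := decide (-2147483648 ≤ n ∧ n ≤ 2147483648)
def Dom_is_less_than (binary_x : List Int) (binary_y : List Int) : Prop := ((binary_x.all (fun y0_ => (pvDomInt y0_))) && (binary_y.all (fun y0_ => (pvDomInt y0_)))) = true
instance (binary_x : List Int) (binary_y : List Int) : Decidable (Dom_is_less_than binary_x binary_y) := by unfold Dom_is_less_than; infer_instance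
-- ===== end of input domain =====

-- B replaces A's LSB-to-MSB flag propagation through NOR-built gate primitives with a
-- single MSB-first early-exit scan over the zero-padded lists (objective: simpler).


-- ===== PORT A =====
def pvNOR (x y : Int) : Int := if x = 0 ∧ y = 0 then 1 else 0
def pvNOT (x : Int) : Int := pvNOR x x
def pvAND (x y : Int) : Int := pvNOR (pvNOT x) (pvNOT y)
def pvOR (x y : Int) : Int := pvNOR (pvNOR x y) (pvNOR x y)
def pvXOR (x y : Int) : Int := pvOR (pvAND (pvNOT x) y) (pvAND x (pvNOT y))
def pvLESS_THAN (x y l : Int) : Int := pvOR (pvAND (pvNOT x) y) (pvAND (pvNOT (pvXOR x y)) l)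

-- indices drawn from range(0, max_len) are always in range, so pyGetD with default 0 is exact
def is_less_than (binary_x : List Int) (binary_y : List Int) : Bool :=
  let max_len : Int := max (binary_x.length : Int) (binary_y.length : Int)
  let x_list : List Int := List.replicate (max_len - (binary_x.length : Int)).toNat 0 ++ binary_x
  let y_list : List Int := List.replicate (max_len - (binary_y.length : Int)).toNat 0 ++ binary_y
  let x_list := x_list.reverse
  let y_list := y_list.reverse
  let l : Int :=
    (PySem.List.pyRange 0 max_len 1).foldl
      (fun l i => pvLESS_THAN (PySem.List.pyGetD x_list i 0) (PySem.List.pyGetD y_list i 0) l) 0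
  l == 1

-- ===== PORT B =====
-- MSB-first scan: first differing (truthy) bit decides; equal sequences give false
def pvScan : List (Int × Int) → Bool
  | [] => false
  | (x, y) :: rest =>
      if (decide (x ≠ 0)) ≠ (decide (y ≠ 0)) then decide (y ≠ 0) else pvScan rest

def is_less_than_alt (binary_x : List Int) (binary_y : List Int) : Bool :=
  let n : Nat := max binary_x.length binary_y.length
  let xs : List Int := List.replicate (n - binary_x.length) 0 ++ binary_x
  let ys : List Int := List.replicate (n - binary_y.length) 0 ++ binary_y
  pvScan (xs.zip ys)

-- ===== PRECONDITION & SPEC =====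
def Spec_is_less_than (binary_x : List Int) (binary_y : List Int) (out : Bool) : Prop := out = is_less_than_alt binary_x binary_y
instance (binary_x : List Int) (binary_y : List Int) (out : Bool) : Decidable (Spec_is_less_than binary_x binary_y out) := by unfold Spec_is_less_than; infer_instance

-- ===== CLAIM (what is proved, stated in full; the proofs are below) =====
def Claim_equal_is_less_than : Prop := ∀ (binary_x : List Int) (binary_y : List Int), Dom_is_less_than binary_x binary_y → Spec_is_less_than binary_x binary_y (is_less_than binary_x binary_y)

-- ===== LEMMAS AND PROOFS =====

theorem pvLESS_THAN_01 (x y l : Int) : pvLESS_THAN x y l = 0 ∨ pvLESS_THAN x y l = 1 := by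
  unfold pvLESS_THAN pvOR pvNOR
  split_ifs <;> simp

theorem foldr_LT_01 (ps : List (Int × Int)) :
    ps.foldr (fun p l => pvLESS_THAN p.1 p.2 l) 0 = 0 ∨ ps.foldr (fun p l => pvLESS_THAN p.1 p.2 l) 0 = 1 := by
  induction ps with
  | nil => left; rfl
  | cons p rest _ => exact pvLESS_THAN_01 p.1 p.2 _

-- the genuine content: A's LSB-first gate recurrence (as a foldr over MSB-first pairs)
-- decides exactly the MSB-first early-exit scan
theorem foldr_LT_eq_scan (ps : List (Int × Int)) :
    ((ps.foldr (fun p l => pvLESS_THAN p.1 p.2 l) 0) == 1) = pvScan ps := by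
  induction ps with
  | nil => simp [pvScan]
  | cons p rest ih =>
    obtain ⟨x, y⟩ := p
    simp only [List.foldr_cons, pvScan, ← ih]
    rcases foldr_LT_01 rest with h | h <;> rw [h] <;>
      by_cases hx : x = 0 <;> by_cases hy : y = 0 <;>
      simp [pvLESS_THAN, pvOR, pvAND, pvNOT, pvXOR, pvNOR, hx, hy]

theorem zip_reverse_of_length_eq (xs ys : List Int) (h : xs.length = ys.length) :
    xs.reverse.zip ys.reverse = (xs.zip ys).reverse := by
  induction xs generalizing ys with
  | nil =>
    have : ys = [] := List.length_eq_zero_iff.mp h.symm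
    simp [this]
  | cons a xs ih =>
    cases ys with
    | nil => simp at h
    | cons b ys =>
      have h' : xs.length = ys.length := by simpa using h
      simp only [List.reverse_cons, List.zip_cons_cons]
      rw [List.zip_append (by simp [h']), ih ys h']
      simp
-- A's indexed loop over range(0, len) on two equal-length lists is the zip fold
theorem foldl_range_two (f : Int → Int → Int → Int) (xs ys : List Int) (init : Int)
    (h : xs.length = ys.length) :
    (PySem.List.pyRange 0 (xs.length : Int) 1).foldl
        (fun l i => f (PySem.List.pyGetD xs i 0) (PySem.List.pyGetD ys i 0) l) init
      = (xs.zip ys).foldl (fun l p => f p.1 p.2 l) init := by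
  have hz : (xs.zip ys).length = xs.length := by simp [h]
  have hcong : (PySem.List.pyRange 0 (xs.length : Int) 1).foldl
        (fun l i => f (PySem.List.pyGetD xs i 0) (PySem.List.pyGetD ys i 0) l) init
      = (PySem.List.pyRange 0 (((xs.zip ys).length : Nat) : Int) 1).foldl
        (fun l i => (fun l (p : Int × Int) => f p.1 p.2 l) l (PySem.List.pyGetD (xs.zip ys) i (0, 0))) init := by
    rw [hz]
    apply PySem.List.foldl_congr_mem
    intro acc i hi
    rw [PySem.List.mem_pyRange_one] at hi
    obtain ⟨h0, h1⟩ := hi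
    have hxi : i.toNat < xs.length := by omega
    have hyi : i.toNat < ys.length := by omega
    have hzi : i.toNat < (xs.zip ys).length := by omega
    rw [PySem.List.pyGetD_eq_getElem xs 0 h0 (by omega),
        PySem.List.pyGetD_eq_getElem ys 0 h0 (by omega),
        PySem.List.pyGetD_eq_getElem (xs.zip ys) (0,0) h0 (by omega)]
    simp [List.getElem_zip]
  rw [hcong]
  exact PySem.List.foldl_pyRange_zero_pyGetD' (xs.zip ys) (0, 0) (fun l p => f p.1 p.2 l) init

-- ===== VERDICT (by name: the statement is the Claim_ definition above) =====
theorem is_less_than_spec : Claim_equal_is_less_than := by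
  intro bx byl _
  unfold Spec_is_less_than is_less_than is_less_than_alt
  simp only []
  set n : Nat := max bx.length byl.length with hn
  have hmax : max (bx.length : Int) (byl.length : Int) = (n : Int) := by
    simp [hn]
  set xs : List Int := List.replicate (n - bx.length) 0 ++ bx with hxs
  set ys : List Int := List.replicate (n - byl.length) 0 ++ byl with hys
  have hx' : List.replicate ((max (bx.length : Int) (byl.length : Int)) - (bx.length : Int)).toNat (0:Int) ++ bx = xs := by
    rw [hmax, hxs]; congr 1; congr 1; omega
  have hy' : List.replicate ((max (bx.length : Int) (byl.length : Int)) - (byl.length : Int)).toNat (0:Int) ++ byl = ys := by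
    rw [hmax, hys]; congr 1; congr 1; omega
  rw [hx', hy', hmax]
  have hlx : xs.length = n := by simp [hxs]; omega
  have hly : ys.length = n := by simp [hys]; omega
  have hlen : xs.reverse.length = ys.reverse.length := by simp [hlx, hly]
  have hnr : (n : Int) = (xs.reverse.length : Int) := by simp [hlx]
  rw [hnr, foldl_range_two pvLESS_THAN xs.reverse ys.reverse 0 hlen]
  have hzip : xs.reverse.zip ys.reverse = (xs.zip ys).reverse := by
    exact zip_reverse_of_length_eq xs ys (by omega)
  rw [hzip, List.foldl_reverse]
  exact foldr_LT_eq_scan (xs.zip ys)
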